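-- pv_equiv track=rewrite | github.com/rbaltrusch/continuo | music_generation/postprocessing.py | smooth_bass_line
-- ===== SOURCE A (Python) =====
-- def smooth_bass_line(list_of_bass_line_inversions):
--     '''smoothness is the counter of how long we let the program search for a smooth bass_line'''
--     list_of_differences = []
--     for bass_line in list_of_bass_line_inversions:
--         difference = 0
--         for i in range(len(bass_line)-1):
--             difference += abs(bass_line[i+1] - bass_line[i])
--         list_of_differences.append(difference)
--     min_index = list_of_differences.index(min(list_of_differences))
--     smoothed_bass_line = list_of_bass_line_inversions[min_index]
--     return smoothed_bass_line
-- ===== SOURCE B (Python) =====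
-- def _score(line):
--     total = 0
--     for prev, cur in zip(line, line[1:]):
--         total += abs(cur - prev)
--     return total
--
--
-- def smooth_bass_line(list_of_bass_line_inversions):
--     '''Stable-sort the candidate lines by smoothness and take the first (ties keep the earliest line).'''
--     return sorted(list_of_bass_line_inversions, key=_score)[0]
-- ===== Notes on version B (the rewrite author's own statement) =====
-- stated objective: alternative
-- what changed: Instead of materializing a list of smoothness scores, scanning it with min(), re-scanning with .index() and re-indexing the input, B stable-sorts the candidate lines by their smoothness key and returns the first element; sort stability makes ties keep the earliest line, exactly matching A's first-minimal-index choice.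
import Mathlib
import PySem

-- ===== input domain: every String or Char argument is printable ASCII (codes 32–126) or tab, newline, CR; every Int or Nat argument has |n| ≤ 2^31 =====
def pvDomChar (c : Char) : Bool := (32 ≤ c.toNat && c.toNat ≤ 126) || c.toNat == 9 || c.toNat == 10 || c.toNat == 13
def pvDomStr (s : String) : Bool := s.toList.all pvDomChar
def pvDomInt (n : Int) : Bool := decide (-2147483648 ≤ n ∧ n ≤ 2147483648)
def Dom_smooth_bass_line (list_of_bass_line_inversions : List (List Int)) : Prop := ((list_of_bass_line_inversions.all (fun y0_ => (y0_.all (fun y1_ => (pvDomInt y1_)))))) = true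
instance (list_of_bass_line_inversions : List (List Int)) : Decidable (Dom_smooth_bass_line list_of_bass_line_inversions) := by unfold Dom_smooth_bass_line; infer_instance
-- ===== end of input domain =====

-- B replaces A's score list + min() + .index() + re-index with a stable sort by smoothness key and taking the first element (alternative algorithm, similar cost).


-- ===== PORT A =====
-- A's inner loop: difference = 0; for i in range(len(bass_line)-1): difference += abs(bass_line[i+1] - bass_line[i])
def sblDifference (bass_line : List Int) : Int :=
  (PySem.List.pyRange 0 ((bass_line.length : Int) - 1) 1).foldl
    (fun difference i =>
      difference + |PySem.List.pyGetD bass_line (i + 1) 0 - PySem.List.pyGetD bass_line i 0|) 0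

def smooth_bass_line (list_of_bass_line_inversions : List (List Int)) : List Int :=
  let list_of_differences :=
    list_of_bass_line_inversions.foldl (fun acc bass_line => acc ++ [sblDifference bass_line]) []
  match PySem.List.min? list_of_differences (fun y => y) with
  | none => []  -- min([]) raises ValueError; excluded by Pre_
  | some m =>
    match PySem.List.index? list_of_differences m with
    | none => []  -- unreachable: the minimum is a member
    | some min_index => (PySem.List.pyGet? list_of_bass_line_inversions (min_index : Int)).getD []

-- ===== PORT B =====
-- B's key: total = 0; for prev, cur in zip(line, line[1:]): total += abs(cur - prev)
def sblScore (line : List Int) : Int :=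
  (line.zip line.tail).foldl (fun total p => total + |p.2 - p.1|) 0

-- sorted(list_of_bass_line_inversions, key=_score)[0]
def smooth_bass_line_alt (list_of_bass_line_inversions : List (List Int)) : List Int :=
  (PySem.List.pyGet? (PySem.List.sorted list_of_bass_line_inversions sblScore) 0).getD []
  -- [0] on the empty sorted list raises IndexError; excluded by Pre_ (getD [] is never reached inside Pre_)

-- ===== PRECONDITION & SPEC =====
-- A raises (min of an empty sequence) on the empty list; B raises there too ([0] on an empty list).
def Pre_smooth_bass_line (list_of_bass_line_inversions : List (List Int)) : Prop :=
  list_of_bass_line_inversions ≠ []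
instance (list_of_bass_line_inversions : List (List Int)) : Decidable (Pre_smooth_bass_line list_of_bass_line_inversions) := by unfold Pre_smooth_bass_line; infer_instance

def pvWitness_smooth_bass_line : List (List Int) := [[0, 3, 1], [2, 2, 2]]

def Spec_smooth_bass_line (list_of_bass_line_inversions : List (List Int)) (out : List Int) : Prop := out = smooth_bass_line_alt list_of_bass_line_inversions
instance (list_of_bass_line_inversions : List (List Int)) (out : List Int) : Decidable (Spec_smooth_bass_line list_of_bass_line_inversions out) := by unfold Spec_smooth_bass_line; infer_instance

-- ===== CLAIM (what is proved, stated in full; the proofs are below) =====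
def Claim_equal_smooth_bass_line : Prop := ∀ (list_of_bass_line_inversions : List (List Int)), Dom_smooth_bass_line list_of_bass_line_inversions → Pre_smooth_bass_line list_of_bass_line_inversions → Spec_smooth_bass_line list_of_bass_line_inversions (smooth_bass_line list_of_bass_line_inversions)

-- ===== LEMMAS AND PROOFS =====

-- A's index-loop score equals B's zip-loop score.
lemma sblDifference_eq_sblScore (bl : List Int) : sblDifference bl = sblScore bl := by
  unfold sblDifference sblScore
  rw [PySem.List.foldl_add, PySem.List.foldl_add]
  simp only [zero_add]
  congr 1
  apply List.ext_getElem
  · simp [PySem.List.length_pyRange_one, List.length_zip]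
  · intro k h1 h2
    simp only [List.getElem_map, PySem.List.getElem_pyRange_one, List.getElem_zip, List.getElem_tail]
    have hk : k < bl.length - 1 := by
      simp only [List.length_map, PySem.List.length_pyRange_one] at h1; omega
    rw [show ((0:Int) + (k:Int) + 1) = ((k+1 : Nat) : Int) by push_cast; ring,
        show ((0:Int) + (k:Int)) = ((k : Nat) : Int) by norm_num]
    rw [PySem.List.pyGetD_natCast, PySem.List.pyGetD_natCast]
    rw [List.getD_eq_getElem _ _ (by omega), List.getD_eq_getElem _ _ (by omega)]

-- A's differences list is the map of B's score.
lemma diffs_eq (xs : List (List Int)) :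
    xs.foldl (fun acc bass_line => acc ++ [sblDifference bass_line]) [] = xs.map sblScore := by
  have h1 : xs.foldl (fun acc bass_line => acc ++ [sblDifference bass_line]) [] =
      xs.map sblDifference := by
    simpa using PySem.List.foldl_append_singleton_eq_map (fun bl => sblDifference bl) xs []
  rw [h1]
  exact List.map_congr_left (fun a _ => sblDifference_eq_sblScore a)

lemma foldl_min_le_init (M : List Int) : ∀ a : Int, M.foldl min a ≤ a := by
  induction M with
  | nil => intro a; simp
  | cons b M ih => intro a; exact le_trans (ih (min a b)) (min_le_left a b)

lemma foldl_min_mem (M : List Int) : ∀ a : Int, M.foldl min a = a ∨ M.foldl min a ∈ M := by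
  induction M with
  | nil => intro a; simp
  | cons b M ih =>
      intro a
      rcases ih (min a b) with h | h
      · rcases min_choice a b with hc | hc
        · left; rw [List.foldl_cons, h, hc]
        · right; rw [List.foldl_cons, h, hc]; exact List.mem_cons_self
      · right; simp [List.foldl_cons, h]

lemma A_singleton (x : List Int) : smooth_bass_line [x] = x := by
  simp [smooth_bass_line, PySem.List.min?_id_cons]

-- A's argmin-of-scores answer obeys the running-best reduction.
lemma A_red (x r : List Int) (rest : List (List Int)) :
    smooth_bass_line (x :: r :: rest) =
      smooth_bass_line ((if sblScore r < sblScore x then r else x) :: rest) := by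
  set fx := sblScore x with hfx
  set fr := sblScore r with hfr
  set M := rest.map sblScore with hM
  unfold smooth_bass_line
  simp only [diffs_eq, List.map_cons, ← hfx, ← hfr, ← hM]
  rw [PySem.List.min?_id_cons, PySem.List.min?_id_cons]
  by_cases h : fr < fx
  · simp only [if_pos h]
    have hmin : List.foldl min fx (fr :: M) = List.foldl min fr M := by
      simp [List.foldl_cons, min_eq_right h.le]
    rw [hmin]
    set m := List.foldl min fr M with hm
    have hmle : m ≤ fr := foldl_min_le_init M fr
    have hne : fx ≠ m := by omega
    rw [PySem.List.index?_cons_of_ne _ hne]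
    have hmem : m ∈ fr :: M := by
      rcases foldl_min_mem M fr with h1 | h1
      · rw [hm, h1]; exact List.mem_cons_self
      · exact List.mem_cons_of_mem _ (hm ▸ h1)
    obtain ⟨j, hj⟩ := Option.isSome_iff_exists.mp ((PySem.List.index?_isSome_iff _ _).mpr hmem)
    rw [hj]
    simp only [Option.map_some]
    simp [PySem.List.pyGet?_natCast]
  · simp only [if_neg h]
    have hxr : fx ≤ fr := by omega
    have hmin : List.foldl min fx (fr :: M) = List.foldl min fx M := by
      simp [List.foldl_cons, min_eq_left hxr]
    rw [hmin]
    set m := List.foldl min fx M with hm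
    have hmle : m ≤ fx := foldl_min_le_init M fx
    by_cases hx : fx = m
    · rw [← hx, PySem.List.index?_cons_self, PySem.List.index?_cons_self]
      simp [PySem.List.pyGet?_zero_cons]
    · have hrne : fr ≠ m := by omega
      have hmem : m ∈ M := by
        rcases foldl_min_mem M fx with h1 | h1
        · exact absurd h1.symm hx
        · exact h1
      obtain ⟨j, hj⟩ := Option.isSome_iff_exists.mp ((PySem.List.index?_isSome_iff _ _).mpr hmem)
      rw [PySem.List.index?_cons_of_ne _ hx, PySem.List.index?_cons_of_ne _ hrne,
          PySem.List.index?_cons_of_ne _ hx, hj]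
      simp only [Option.map_some]
      simp only [PySem.List.pyGet?_natCast, List.getElem?_cons_succ]

-- Head of the insertion-sort fold is the running strict-min best (stability: ties keep the earlier element).
lemma head_foldl_insertBy :
    ∀ (rest : List (List Int)) (h : List Int) (t : List (List Int)),
      ((rest.foldl
          (fun acc x => PySem.List.insertBy (fun a b => decide (sblScore a < sblScore b)) x acc)
          (h :: t)).head?) =
        some (rest.foldl (fun b x => if sblScore x < sblScore b then x else b) h) := by
  intro rest
  induction rest with
  | nil => intro h t; simp
  | cons r rest ih =>
      intro h t
      simp only [List.foldl_cons, PySem.List.insertBy]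
      by_cases hc : sblScore r < sblScore h
      · simp only [hc, decide_true, if_true]
        exact ih r (h :: t)
      · simp only [hc, decide_false, if_false]
        exact ih h _

-- B is the running strict-min best of the scores.
lemma B_eq_runBest (x : List Int) (rest : List (List Int)) :
    smooth_bass_line_alt (x :: rest) =
      rest.foldl (fun b r => if sblScore r < sblScore b then r else b) x := by
  unfold smooth_bass_line_alt
  rw [PySem.List.sorted_eq_foldl_insertBy]
  have h0 : PySem.List.insertBy (fun a b => decide (sblScore a < sblScore b)) x ([] : List (List Int)) = [x] := by
    simp [PySem.List.insertBy]
  rw [List.foldl_cons, h0]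
  have := head_foldl_insertBy rest x []
  obtain ⟨l, hl⟩ : ∃ l, (rest.foldl
      (fun acc y => PySem.List.insertBy (fun a b => decide (sblScore a < sblScore b)) y acc)
      [x]) = (rest.foldl (fun b r => if sblScore r < sblScore b then r else b) x) :: l := by
    cases hfe : (rest.foldl
        (fun acc y => PySem.List.insertBy (fun a b => decide (sblScore a < sblScore b)) y acc)
        [x]) with
    | nil => rw [hfe] at this; simp at this
    | cons a l => rw [hfe] at this; simp at this; exact ⟨l, by rw [this]⟩
  rw [hl]
  simp

lemma main_eq : ∀ (rest : List (List Int)) (x : List Int),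
    smooth_bass_line (x :: rest) = smooth_bass_line_alt (x :: rest) := by
  intro rest
  induction rest with
  | nil => intro x; rw [A_singleton, B_eq_runBest]; rfl
  | cons r rest ih =>
      intro x
      rw [A_red, B_eq_runBest, List.foldl_cons, ← B_eq_runBest]
      exact ih _
-- ===== VERDICT (by name: the statement is the Claim_ definition above) =====
theorem smooth_bass_line_spec : Claim_equal_smooth_bass_line := by
  intro xs _ hpre
  unfold Spec_smooth_bass_line
  match xs, hpre with
  | x :: rest, _ => exact main_eq rest x
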